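-- pv_equiv track=rewrite | github.com/lowmanjr/collegefrontoffice | python_engine/ingest_tennessee_transfers.py | parse_class_year
-- ===== SOURCE A (Python) =====
-- def parse_class_year(raw: str) -> int | None:
--     tokens = set()
--     for tok in raw.split():
--         for part in tok.split("/"):
--             tokens.add(part.upper())
--     is_rs = "RS" in tokens
--     if "GR" in tokens:
--         return 5
--     if "SR" in tokens:
--         return 5 if (is_rs or "TR" in tokens) else 4
--     if "JR" in tokens:
--         return 4 if is_rs else 3
--     if "SO" in tokens:
--         return 3 if is_rs else 2
--     if "FR" in tokens:
--         return 2 if is_rs else 1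
--     return None
-- ===== SOURCE B (Python) =====
-- _RANK = {"FR": 1, "SO": 2, "JR": 3, "SR": 4, "GR": 5}
--
--
-- def parse_class_year(raw: str) -> int | None:
--     # One accumulator pass: track the maximum class rank seen and the RS/TR flags;
--     # the answer is then a closed-form adjustment of the maximum rank.
--     m = 0
--     rs = False
--     tr = False
--     for tok in raw.split():
--         for part in tok.split("/"):
--             p = part.upper()
--             r = _RANK.get(p, 0)
--             if r > m:
--                 m = r
--             if p == "RS":
--                 rs = True
--             if p == "TR":
--                 tr = True
--     if m == 0:
--         return None
--     if m == 5:
--         return 5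
--     if m == 4:
--         return 5 if (rs or tr) else 4
--     return m + 1 if rs else m
-- ===== Notes on version B (the rewrite author's own statement) =====
-- stated objective: alternative
-- what changed: Replaces A's token-set construction plus five-branch priority cascade by a single accumulator pass that tracks the maximum class rank (FR=1..GR=5) and RS/TR flags, then returns a closed-form adjustment of that maximum; correct because A's cascade always fires on the highest-ranked code present and the bases equal the ranks.
import Mathlib
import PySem

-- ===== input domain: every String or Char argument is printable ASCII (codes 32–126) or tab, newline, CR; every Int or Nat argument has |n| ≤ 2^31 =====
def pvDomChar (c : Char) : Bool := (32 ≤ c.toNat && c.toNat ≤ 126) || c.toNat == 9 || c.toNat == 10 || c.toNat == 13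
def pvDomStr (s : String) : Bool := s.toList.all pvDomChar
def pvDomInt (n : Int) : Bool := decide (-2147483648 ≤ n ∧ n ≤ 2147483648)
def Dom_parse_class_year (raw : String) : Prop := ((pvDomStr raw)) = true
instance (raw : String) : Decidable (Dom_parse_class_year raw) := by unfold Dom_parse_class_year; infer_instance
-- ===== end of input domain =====

-- B replaces A's token-set + five-branch priority cascade by one accumulator pass
-- (maximum class rank + RS/TR flags) with a closed-form adjustment at the end (objective: alternative).

-- s.split("/") for the literal nonempty separator "/": exact via PySem.Chars.splitOn
def pySplitSlash (s : String) : List String := (PySem.Chars.splitOn s.toList ['/']).map String.ofList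

-- ===== PORT A =====
def parse_class_year (raw : String) : Option Int :=
  let tokens : PySem.Set String :=
    (PySem.Str.split₀ raw).foldl
      (fun s tok =>
        (pySplitSlash tok).foldl
          (fun s part => PySem.Set.add s (PySem.Str.upper part)) s)
      PySem.Set.empty
  let is_rs := PySem.Set.contains tokens "RS"
  if PySem.Set.contains tokens "GR" then some 5
  else if PySem.Set.contains tokens "SR" then
    some (if is_rs || PySem.Set.contains tokens "TR" then 5 else 4)
  else if PySem.Set.contains tokens "JR" then some (if is_rs then 4 else 3)
  else if PySem.Set.contains tokens "SO" then some (if is_rs then 3 else 2)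
  else if PySem.Set.contains tokens "FR" then some (if is_rs then 2 else 1)
  else none

-- ===== PORT B =====
def pvRankDict : PySem.Dict String Int :=
  PySem.Dict.ofList [("FR", 1), ("SO", 2), ("JR", 3), ("SR", 4), ("GR", 5)]

-- the body of Source B's inner loop: update (m, rs, tr) with one part
def pvStep (st : Int × Bool × Bool) (part : String) : Int × Bool × Bool :=
  let p := PySem.Str.upper part
  let r := PySem.Dict.getD pvRankDict p 0
  (if r > st.1 then r else st.1, st.2.1 || (p == "RS"), st.2.2 || (p == "TR"))

def parse_class_year_alt (raw : String) : Option Int :=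
  let st :=
    (PySem.Str.split₀ raw).foldl
      (fun st tok => (pySplitSlash tok).foldl pvStep st)
      ((0 : Int), false, false)
  let m := st.1
  let rs := st.2.1
  let tr := st.2.2
  if m = 0 then none
  else if m = 5 then some 5
  else if m = 4 then some (if rs || tr then 5 else 4)
  else some (if rs then m + 1 else m)

-- ===== PRECONDITION & SPEC =====
def Spec_parse_class_year (raw : String) (out : Option Int) : Prop := out = parse_class_year_alt raw
instance (raw : String) (out : Option Int) : Decidable (Spec_parse_class_year raw out) := by unfold Spec_parse_class_year; infer_instance

-- ===== CLAIM (what is proved, stated in full; the proofs are below) =====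
def Claim_equal_parse_class_year : Prop := ∀ (raw : String), Dom_parse_class_year raw → Spec_parse_class_year raw (parse_class_year raw)

-- ===== LEMMAS AND PROOFS =====

-- the rank lookup, as an if-chain on the (already uppercased) part
def pvRank (p : String) : Int :=
  if p = "FR" then 1 else if p = "SO" then 2 else if p = "JR" then 3
  else if p = "SR" then 4 else if p = "GR" then 5 else 0

theorem pvRank_eq (p : String) : PySem.Dict.getD pvRankDict p 0 = pvRank p := by
  have h : pvRankDict
      = ((((PySem.Dict.empty.insert "FR" (1:Int)).insert "SO" 2).insert "JR" 3).insert "SR" 4).insert "GR" 5 := by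
    rfl
  rw [h]
  simp only [PySem.Dict.getD_insert, PySem.Dict.getD_empty, pvRank]
  split_ifs <;> simp_all

theorem pvRank_nonneg (p : String) : 0 ≤ pvRank p := by
  unfold pvRank; split_ifs <;> omega

-- the max-rank accumulator over a list of (already uppercased) parts
def pvMax (m : Int) (l : List String) : Int :=
  l.foldl (fun m p => if pvRank p > m then pvRank p else m) m

-- A's nested add-loop builds exactly the set of the flattened, mapped token list.
theorem pv_tokens_eq (xs : List String) (s : PySem.Set String) :
    xs.foldl
      (fun s tok =>
        (pySplitSlash tok).foldl
          (fun s part => PySem.Set.add s (PySem.Str.upper part)) s) s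
    = (xs.flatMap (fun tok => (pySplitSlash tok).map PySem.Str.upper)).foldl
        PySem.Set.add s := by
  induction xs generalizing s with
  | nil => rfl
  | cons tok rest ih =>
    simp [List.flatMap_cons, List.foldl_append, List.foldl_map, ih]

-- one token's inner loop, with the uppercasing pushed into the list
theorem pv_inner_fold_eq (parts : List String) (st : Int × Bool × Bool) :
    parts.foldl pvStep st
    = (parts.map PySem.Str.upper).foldl
        (fun st p => (if pvRank p > st.1 then pvRank p else st.1,
                      st.2.1 || (p == "RS"), st.2.2 || (p == "TR"))) st := by
  induction parts generalizing st with
  | nil => rfl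
  | cons part rest ih =>
    simp only [List.foldl_cons, List.map_cons, ih, pvStep, pvRank_eq]

-- B's nested loop is a fold over the same flattened, uppercased list.
theorem pv_b_fold_eq (xs : List String) (st : Int × Bool × Bool) :
    xs.foldl (fun st tok => (pySplitSlash tok).foldl pvStep st) st
    = (xs.flatMap (fun tok => (pySplitSlash tok).map PySem.Str.upper)).foldl
        (fun st p => (if pvRank p > st.1 then pvRank p else st.1,
                      st.2.1 || (p == "RS"), st.2.2 || (p == "TR"))) st := by
  induction xs generalizing st with
  | nil => rfl
  | cons tok rest ih =>
    rw [List.foldl_cons, ih, List.flatMap_cons, List.foldl_append, pv_inner_fold_eq]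

-- the triple fold splits into its three independent components
theorem pv_fold_split (l : List String) (st : Int × Bool × Bool) :
    l.foldl (fun st p => (if pvRank p > st.1 then pvRank p else st.1,
                          st.2.1 || (p == "RS"), st.2.2 || (p == "TR"))) st
    = (pvMax st.1 l, st.2.1 || l.contains "RS", st.2.2 || l.contains "TR") := by
  induction l generalizing st with
  | nil => simp [pvMax]
  | cons p rest ih =>
    simp only [List.foldl_cons, ih, pvMax, List.contains_cons, Prod.mk.injEq]
    refine ⟨trivial, ?_, ?_⟩ <;> simp [Bool.or_assoc, BEq.comm]

theorem pvMax_cons (p : String) (l : List String) :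
    pvMax 0 (p :: l) = max (pvRank p) (pvMax 0 l) := by
  have key : ∀ (l : List String) (m : Int), 0 ≤ m → pvMax m l = max m (pvMax 0 l) := by
    intro l
    induction l with
    | nil => intro m h; simp only [pvMax, List.foldl_nil]; omega
    | cons q rest ih =>
      intro m h
      have hq := pvRank_nonneg q
      have h0 : (if pvRank q > (0:Int) then pvRank q else 0) = pvRank q := by
        split_ifs <;> omega
      show pvMax (if pvRank q > m then pvRank q else m) rest
          = max m (pvMax (if pvRank q > (0:Int) then pvRank q else 0) rest)
      rw [h0, ih _ (by split_ifs <;> omega), ih _ hq]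
      split_ifs <;> omega
  have hp := pvRank_nonneg p
  show pvMax (if pvRank p > (0:Int) then pvRank p else 0) l = max (pvRank p) (pvMax 0 l)
  rw [show (if pvRank p > (0:Int) then pvRank p else 0) = pvRank p from by split_ifs <;> omega,
      key l _ hp]

-- the maximum rank equals A's priority cascade over memberships
set_option maxHeartbeats 1000000 in
theorem pvMax_char (l : List String) :
    pvMax 0 l
    = if l.contains "GR" then 5 else if l.contains "SR" then 4
      else if l.contains "JR" then 3 else if l.contains "SO" then 2
      else if l.contains "FR" then 1 else 0 := by
  induction l with
  | nil => rfl
  | cons p rest ih =>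
    rw [pvMax_cons, ih]
    simp only [List.contains_cons, Bool.or_eq_true, beq_iff_eq]
    unfold pvRank
    split_ifs <;> simp_all

-- ===== VERDICT (by name: the statement is the Claim_ definition above) =====
set_option maxHeartbeats 1000000 in
theorem parse_class_year_spec : Claim_equal_parse_class_year := by
  intro raw _
  unfold Spec_parse_class_year parse_class_year parse_class_year_alt
  rw [show (PySem.Set.empty : PySem.Set String) = [] from rfl, pv_tokens_eq,
      ← PySem.Set.ofList_eq_foldl, pv_b_fold_eq, pv_fold_split]
  set l := (PySem.Str.split₀ raw).flatMap (fun tok => (pySplitSlash tok).map PySem.Str.upper)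
    with hl
  have hmem : ∀ x : String, PySem.Set.contains (PySem.Set.ofList l) x = l.contains x := by
    intro x
    simp [PySem.Set.contains_eq_listContains, PySem.Set.mem_ofList]
  simp only [hmem, pvMax_char, Bool.false_or]
  split_ifs <;> first | rfl | omega
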